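-- pv_equiv track=rewrite | github.com/nnatchy/Python-2021-1 | grader homework/09/09_NestedList_★★★_Fill_In_Numbers.py | pattern4
-- ===== SOURCE A (Python) =====
-- def rowtocol(l):
--     real = []
--     tempreal = []
--     for i in range(len(l)):
--         for j in range(len(l[i])):
--             tempreal.append(l[j][i])
--         real.append(tempreal)
--         tempreal = []
--     return real
--
-- def pattern4(N):
--     k = 1
--     final = []
--     templist = [0]*N
--     for i in range(0, N):
--         for j in range(N-i-1, N):
--             templist[j] = k
--             k += 1
--         final.append((templist[::-1]))
--         templist = [0]*N
--     return rowtocol(final)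
-- ===== SOURCE B (Python) =====
-- def pattern4(N):
--     # Closed form: cell (i, j) for i <= j holds (1 + j*(j+1)//2) + (j - i), else 0.
--     return [[1 + j * (j + 1) // 2 + (j - i) if i <= j else 0 for j in range(N)]
--             for i in range(N)]
-- ===== Notes on version B (the rewrite author's own statement) =====
-- stated objective: simpler
-- what changed: A builds each row with an index-writing loop, reverses it, then transposes the whole matrix in a second nested pass; B emits the final matrix directly from the closed form cell(i,j) = 1 + j*(j+1)//2 + (j-i) for i <= j (0 below the diagonal) in a single nested comprehension.
import Mathlib
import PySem

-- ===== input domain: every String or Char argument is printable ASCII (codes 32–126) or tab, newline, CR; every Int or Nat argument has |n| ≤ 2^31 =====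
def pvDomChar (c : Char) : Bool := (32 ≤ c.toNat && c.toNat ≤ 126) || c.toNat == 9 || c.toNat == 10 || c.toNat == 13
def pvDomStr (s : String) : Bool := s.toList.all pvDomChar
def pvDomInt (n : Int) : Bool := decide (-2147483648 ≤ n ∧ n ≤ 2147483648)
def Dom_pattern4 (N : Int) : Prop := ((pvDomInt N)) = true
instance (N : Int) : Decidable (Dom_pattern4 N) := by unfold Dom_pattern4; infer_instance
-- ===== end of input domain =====

-- B replaces A's row-building loop, list reversal and separate transpose pass by directly
-- emitting each cell from the closed form (i,j) ↦ 1 + j*(j+1)//2 + (j-i) for i ≤ j, else 0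
-- (objective: simpler — one nested comprehension instead of three passes).

-- ===== PORT A =====
-- pyGetD is exact here: every index rowtocol/pattern4 reads is in range on the square lists they build.
def rowtocol (l : List (List Int)) : List (List Int) :=
  (PySem.List.pyRange 0 (l.length : Int) 1).foldl
    (fun real i =>
      real ++ [(PySem.List.pyRange 0 ((PySem.List.pyGetD l i []).length : Int) 1).foldl
        (fun tempreal j => tempreal ++ [PySem.List.pyGetD (PySem.List.pyGetD l j []) i 0]) []])
    []

def pattern4 (N : Int) : List (List Int) :=
  rowtocol (((PySem.List.pyRange 0 N 1).foldl
    (fun (s : Int × List (List Int)) i =>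
      let inner := (PySem.List.pyRange (N - i - 1) N 1).foldl
        (fun (t : List Int × Int) j => (PySem.List.pySetD t.1 j t.2, t.2 + 1))
        (List.replicate N.toNat 0, s.1)
      (inner.2, s.2 ++ [(PySem.List.slice? inner.1 none none (-1)).getD []]))
    (1, [])).2)

-- ===== PORT B =====
def pattern4_alt (N : Int) : List (List Int) :=
  (PySem.List.pyRange 0 N 1).map (fun i =>
    (PySem.List.pyRange 0 N 1).map (fun j =>
      if i ≤ j then 1 + PySem.Int.floordiv (j * (j + 1)) 2 + (j - i) else 0))

-- ===== PRECONDITION & SPEC =====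
def Spec_pattern4 (N : Int) (out : List (List Int)) : Prop := out = pattern4_alt N
instance (N : Int) (out : List (List Int)) : Decidable (Spec_pattern4 N out) := by unfold Spec_pattern4; infer_instance

-- ===== CLAIM (what is proved, stated in full; the proofs are below) =====
def Claim_equal_pattern4 : Prop := ∀ (N : Int), Dom_pattern4 N → Spec_pattern4 N (pattern4 N)

-- ===== LEMMAS AND PROOFS =====

/-- Running sum 1+2+⋯+a (how far A's counter k has advanced after a rows). -/
def tri : Nat → Int
  | 0 => 0
  | a + 1 => tri a + ((a : Int) + 1)

/-- Row `a` of A's intermediate matrix `final` (before the transpose). -/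
def rowA (n a : Nat) : List Int :=
  ((List.range (a + 1)).map (fun t : Nat => (1 + tri a) + (t : Int))).reverse ++
    List.replicate (n - 1 - a) 0

lemma take_succ_set (l : List Int) (n : Nat) (x : Int) (h : n < l.length) :
    (l.set n x).take (n + 1) = l.take n ++ [x] := by
  apply List.ext_getElem
  · simp; omega
  · intro i h1 h2
    rw [List.getElem_take, List.getElem_set]
    by_cases hi : i = n
    · subst hi
      rw [List.getElem_append_right (by simp [Nat.min_eq_left h.le])]
      simp [Nat.min_eq_left h.le]
    · have hin : i < n := by
        simp only [List.length_append, List.length_take, List.length_singleton] at h2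
        omega
      rw [List.getElem_append_left (by simp [Nat.min_eq_left h.le]; omega), List.getElem_take,
        if_neg (by omega)]

lemma inner_fold (N : Int) (d : Nat) : ∀ (a k : Int) (tl : List Int), 0 ≤ a → a + d = N →
    tl.length = N.toNat →
    (PySem.List.pyRange a N 1).foldl
      (fun (t : List Int × Int) j => (PySem.List.pySetD t.1 j t.2, t.2 + 1)) (tl, k)
    = (tl.take a.toNat ++ (List.range d).map (fun t : Nat => k + (t : Int)), k + d) := by
  induction d with
  | zero =>
    intro a k tl ha hd hlen
    rw [PySem.List.pyRange_one_eq_nil (by omega)]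
    have htn : a.toNat = tl.length := by omega
    rw [htn, List.take_length]
    simp
  | succ d ih =>
    intro a k tl ha hd hlen
    rw [PySem.List.pyRange_one_cons (by omega)]
    simp only [List.foldl_cons]
    rw [PySem.List.pySetD_of_nonneg tl k ha]
    rw [ih (a + 1) (k + 1) (tl.set a.toNat k) (by omega) (by omega) (by simpa using hlen)]
    have hta : (a + 1).toNat = a.toNat + 1 := by omega
    have htl : a.toNat < tl.length := by omega
    rw [hta, take_succ_set tl a.toNat k htl]
    have hmap : (List.range (d + 1)).map (fun t : Nat => k + (t : Int))
        = k :: (List.range d).map (fun t : Nat => (k + 1) + (t : Int)) := by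
      rw [List.range_succ_eq_map, List.map_cons, List.map_map]
      have : ((fun t : Nat => k + (t : Int)) ∘ Nat.succ) = fun t : Nat => (k + 1) + (t : Int) := by
        funext t; simp [Function.comp]; ring
      rw [this]
      norm_num
    rw [hmap]
    refine Prod.ext ?_ ?_
    · simp [List.append_assoc]
    · simp; ring

lemma outer_fold (n : Nat) (m : Nat) : ∀ (a : Nat) (acc : List (List Int)), a + m = n →
    (PySem.List.pyRange (a : Int) (n : Int) 1).foldl
      (fun (s : Int × List (List Int)) i =>
        let inner := (PySem.List.pyRange ((n : Int) - i - 1) (n : Int) 1).foldl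
          (fun (t : List Int × Int) j => (PySem.List.pySetD t.1 j t.2, t.2 + 1))
          (List.replicate n 0, s.1)
        (inner.2, s.2 ++ [(PySem.List.slice? inner.1 none none (-1)).getD []]))
      (1 + tri a, acc)
    = (1 + tri n, acc ++ (List.range m).map (fun t => rowA n (a + t))) := by
  induction m with
  | zero =>
    intro a acc ha
    have : a = n := by omega
    subst this
    rw [PySem.List.pyRange_one_eq_nil (by omega)]
    simp
  | succ m ih =>
    intro a acc ha
    have han : a < n := by omega
    rw [PySem.List.pyRange_one_cons (by exact_mod_cast han)]
    simp only [List.foldl_cons]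
    rw [inner_fold (n : Int) (a + 1) ((n : Int) - (a : Int) - 1) (1 + tri a)
      (List.replicate n 0) (by omega) (by push_cast; omega) (by simp)]
    simp only [PySem.List.slice?_none_none_neg_one, Option.getD_some]
    rw [List.take_replicate, List.reverse_append, List.reverse_replicate]
    have hmin : min ((n : Int) - (a : Int) - 1).toNat n = n - 1 - a := by omega
    rw [hmin]
    have hrow : ((List.range (a + 1)).map (fun t : Nat => 1 + tri a + (t : Int))).reverse ++
        List.replicate (n - 1 - a) 0 = rowA n a := rfl
    rw [hrow]
    have hk : (1 : Int) + tri a + ((a : Int) + 1) = 1 + tri (a + 1) := by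
      simp [tri]; ring
    have hcast : ((a : Int) + 1) = ((a + 1 : Nat) : Int) := by push_cast; ring
    rw [show (1 : Int) + tri a + ((a + 1 : Nat) : Int) = 1 + tri (a + 1) by
      rw [← hcast]; exact hk]
    have hstep := ih (a + 1) (acc ++ [rowA n a]) (by omega)
    simp only [PySem.List.slice?_none_none_neg_one, Option.getD_some] at hstep
    push_cast at hstep ⊢
    rw [hstep]
    have hfun : (List.range (m + 1)).map (fun t => rowA n (a + t))
        = rowA n a :: (List.range m).map (fun t => rowA n (a + 1 + t)) := by
      rw [List.range_succ_eq_map, List.map_cons, List.map_map]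
      have : ((fun t => rowA n (a + t)) ∘ Nat.succ) = fun t => rowA n (a + 1 + t) := by
        funext t
        have ht : a + Nat.succ t = a + 1 + t := by omega
        simp only [Function.comp_apply, ht]
      rw [this, Nat.add_zero]
    rw [hfun]
    simp [List.append_assoc]

lemma length_rowA (n a : Nat) (h : a < n) : (rowA n a).length = n := by
  simp [rowA]; omega

lemma rowA_getD (n a i : Nat) (ha : a < n) (hi : i < n) :
    (rowA n a).getD i 0 = if i ≤ a then 1 + tri a + ((a : Int) - (i : Int)) else 0 := by
  unfold rowA
  by_cases h : i ≤ a
  · rw [if_pos h]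
    rw [List.getD_append _ _ _ i (by simp; omega)]
    rw [List.getD_eq_getElem _ _ (by simp; omega)]
    simp only [List.getElem_reverse, List.length_map, List.length_range, List.getElem_map,
      List.getElem_range]
    congr 1
    omega
  · rw [if_neg h]
    rw [List.getD_append_right _ _ _ i (by simp; omega)]
    simp only [List.length_reverse, List.length_map, List.length_range]
    rw [List.getD_eq_getElem _ _ (by simp; omega)]
    simp

lemma tri_two (a : Nat) : 2 * tri a = (a : Int) * ((a : Int) + 1) := by
  induction a with
  | zero => simp [tri]
  | succ a ih =>
    simp only [tri]
    push_cast
    linear_combination ih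

lemma tri_closed (a : Nat) : tri a = PySem.Int.floordiv ((a : Int) * ((a : Int) + 1)) 2 := by
  rw [← tri_two a, PySem.Int.floordiv_eq_ediv_of_pos (by norm_num)]
  exact (Int.mul_ediv_cancel_left _ (by norm_num)).symm

lemma pattern4_neg (N : Int) (h : N ≤ 0) : pattern4 N = [] := by
  unfold pattern4
  rw [PySem.List.pyRange_one_eq_nil h]
  simp only [List.foldl_nil]
  unfold rowtocol
  simp [PySem.List.pyRange_one_eq_nil]

lemma rowtocol_rows (n : Nat) :
    rowtocol ((List.range n).map (rowA n)) = pattern4_alt (n : Int) := by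
  unfold rowtocol pattern4_alt
  rw [PySem.List.foldl_append_singleton_eq_map]
  simp only [List.nil_append, List.length_map, List.length_range]
  rw [PySem.List.pyRange_zero_nat n, List.map_map, List.map_map]
  apply List.map_congr_left
  intro k hk
  have hkn : k < n := List.mem_range.mp hk
  simp only [Function.comp_apply]
  rw [PySem.List.pyGetD_natCast]
  have hrow : ((List.range n).map (rowA n)).getD k [] = rowA n k := by simp [hkn]
  rw [hrow, length_rowA n k hkn]
  rw [PySem.List.foldl_append_singleton_eq_map]
  simp only [List.nil_append]
  rw [PySem.List.pyRange_zero_nat n, List.map_map, List.map_map]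
  apply List.map_congr_left
  intro j hj
  have hjn : j < n := List.mem_range.mp hj
  simp only [Function.comp_apply]
  have hrowj : ((List.range n).map (rowA n)).getD j [] = rowA n j := by simp [hjn]
  rw [PySem.List.pyGetD_natCast, PySem.List.pyGetD_natCast, hrowj]
  rw [rowA_getD n j k hjn hkn, tri_closed j]
  by_cases h : k ≤ j
  · rw [if_pos h, if_pos (by exact_mod_cast h)]
  · rw [if_neg h, if_neg (by exact_mod_cast h)]

-- ===== VERDICT (by name: the statement is the Claim_ definition above) =====
theorem pattern4_spec : Claim_equal_pattern4 := by
  intro N _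
  unfold Spec_pattern4
  rcases le_or_gt N 0 with hN | hN
  · rw [pattern4_neg N hN]
    unfold pattern4_alt
    rw [PySem.List.pyRange_one_eq_nil hN]
    simp
  · obtain ⟨n, rfl⟩ : ∃ n : Nat, N = (n : Int) := ⟨N.toNat, (Int.toNat_of_nonneg hN.le).symm⟩
    unfold pattern4
    simp only [Int.toNat_natCast]
    have h0 := outer_fold n n 0 [] (by omega)
    simp only [Nat.cast_zero, tri, add_zero, List.nil_append, Nat.zero_add] at h0
    rw [h0]
    exact rowtocol_rows n
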